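-- pv_equiv track=rewrite | github.com/summer2293/algorithm-study | src/soomin/programmers/62048.py | solution
-- ===== SOURCE A (Python) =====
-- def solution(w,h):
--     answer = 0
--     short, long = min(w,h), max(w,h) # O(N)
--     while (short != 0):
--         if short == 1:
--             answer += 0
--             break
--         count, long = long//short, long%short
--         answer += (short * short - short) * count
--         short, long = min(short,long), max(short,long)
--     return answer
-- ===== SOURCE B (Python) =====
-- def solution(w, h):
--     # closed form: the diagonal passes through w + h - gcd(w, h) cells
--     a, b = w, h
--     while b:
--         a, b = b, a % b
--     return w * h - (w + h - a)
-- ===== Notes on version B (the rewrite author's own statement) =====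
-- stated objective: simpler
-- what changed: Replaces A's iterative accumulation over Euclid steps with the closed form w*h - (w + h - gcd(w,h)), computing gcd by a plain Euclid loop.
import Mathlib
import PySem

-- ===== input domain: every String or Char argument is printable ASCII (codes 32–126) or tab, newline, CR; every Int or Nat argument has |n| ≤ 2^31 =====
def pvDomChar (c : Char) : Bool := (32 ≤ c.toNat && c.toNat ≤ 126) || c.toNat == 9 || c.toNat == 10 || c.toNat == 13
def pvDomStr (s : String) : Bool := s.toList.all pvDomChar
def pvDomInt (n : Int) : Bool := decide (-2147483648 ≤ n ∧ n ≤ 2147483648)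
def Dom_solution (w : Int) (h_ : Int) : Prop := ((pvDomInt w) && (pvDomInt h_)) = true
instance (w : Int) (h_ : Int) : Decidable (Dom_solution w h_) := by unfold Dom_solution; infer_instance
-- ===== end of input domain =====

-- B replaces A's per-Euclid-step accumulation with the closed form w*h - (w + h - gcd(w,h)): simpler.
-- (Pre_ excludes negative inputs, on which Python A never returns: its while loop does not terminate.)

-- ===== PORT A =====
-- the 'short ≤ 0' guard merges Python's 'short == 0' exit with a totality guard for
-- negative short, where the Python loop never terminates (outside Pre_solution).
def solutionLoop (short long acc : Int) : Int :=
  if short ≤ 0 then acc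
  else if short = 1 then acc
  else
    let count := PySem.Int.floordiv long short
    let r := PySem.Int.mod long short
    solutionLoop (min short r) (max short r) (acc + (short * short - short) * count)
termination_by short.toNat
decreasing_by
  have h2 : (2:Int) ≤ short := by omega
  have hrlt : PySem.Int.mod long short < short := PySem.Int.mod_lt long (by omega)
  simp only [min]
  omega

def solution (w : Int) (h_ : Int) : Int :=
  solutionLoop (min w h_) (max w h_) 0

-- ===== PORT B =====
def euclid (a b : Int) : Int :=
  if _hb : b = 0 then a else euclid b (PySem.Int.mod a b)
termination_by b.natAbs
decreasing_by
  rcases lt_or_gt_of_ne _hb with hneg | hpos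
  · have := PySem.Int.mod_neg_bounds a hneg
    omega
  · have h0 := PySem.Int.mod_nonneg a hpos
    have h1 := PySem.Int.mod_lt a hpos
    omega

def solution_alt (w : Int) (h_ : Int) : Int :=
  w * h_ - (w + h_ - euclid w h_)

-- ===== PRECONDITION & SPEC =====
-- Pre_ excludes negative w or h, on which Python A's while loop never terminates (A returns no value there).
def Pre_solution (w : Int) (h_ : Int) : Prop := 0 ≤ w ∧ 0 ≤ h_
instance (w : Int) (h_ : Int) : Decidable (Pre_solution w h_) := by unfold Pre_solution; infer_instance
def pvWitness_solution : Int × Int := (4, 3)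
def Spec_solution (w : Int) (h_ : Int) (out : Int) : Prop := out = solution_alt w h_
instance (w : Int) (h_ : Int) (out : Int) : Decidable (Spec_solution w h_ out) := by unfold Spec_solution; infer_instance

-- ===== CLAIM (what is proved, stated in full; the proofs are below) =====
def Claim_equal_solution : Prop := ∀ (w : Int) (h_ : Int), Dom_solution w h_ → Pre_solution w h_ → Spec_solution w h_ (solution w h_)

-- ===== LEMMAS AND PROOFS =====

theorem gcd_step (a b : Int) (ha : 0 ≤ a) (hb : 0 < b) : Int.gcd b (a % b) = Int.gcd a b := by
  lift a to ℕ using ha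
  lift b to ℕ using hb.le
  rw [← Int.natCast_emod]
  simp only [Int.gcd_natCast_natCast]
  rw [Nat.gcd_comm b (a % b), ← Nat.gcd_rec, Nat.gcd_comm]

-- B's Euclid loop computes Int.gcd on nonnegative inputs
theorem euclid_eq_gcd (a b : Int) (ha : 0 ≤ a) (hb : 0 ≤ b) : euclid a b = (Int.gcd a b : Int) := by
  induction hn : b.toNat using Nat.strong_induction_on generalizing a b with
  | _ n ih =>
    by_cases h0 : b = 0
    · subst h0
      rw [euclid]
      simp [Int.gcd, Int.natAbs_of_nonneg ha]
    · have hbpos : 0 < b := lt_of_le_of_ne hb (Ne.symm h0)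
      have hm0 := PySem.Int.mod_nonneg a hbpos
      have hm1 := PySem.Int.mod_lt a hbpos
      rw [euclid]
      simp only [h0]
      rw [ih (PySem.Int.mod a b).toNat (by omega) b (PySem.Int.mod a b) hb hm0 rfl]
      rw [PySem.Int.mod_eq_emod_of_pos hbpos, gcd_step a b ha hbpos]
      simp

-- invariant of A's loop
theorem solutionLoop_eq (n : Nat) (short long acc : Int) (hn : short.toNat ≤ n)
    (h0 : 0 ≤ short) (hsl : short ≤ long) :
    solutionLoop short long acc = acc + short * long - short - long + (Int.gcd short long : Int) := by
  induction n generalizing short long acc with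
  | zero =>
    have hs0 : short = 0 := by omega
    subst hs0
    rw [solutionLoop]
    simp [Int.gcd, Int.natAbs_of_nonneg (le_trans h0 hsl)]
  | succ n ih =>
    rw [solutionLoop]
    by_cases hz : short ≤ 0
    · have hs0 : short = 0 := le_antisymm hz h0
      subst hs0
      simp [Int.gcd, Int.natAbs_of_nonneg (le_trans h0 hsl)]
    · simp only [hz, if_false]
      by_cases h1 : short = 1
      · subst h1
        simp [Int.gcd]; omega
      · simp only [h1, if_false]
        have h2 : (2:Int) ≤ short := by omega
        have hm0 := PySem.Int.mod_nonneg long (show (0:Int) < short by omega)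
        have hm1 := PySem.Int.mod_lt long (show (0:Int) < short by omega)
        have hmin : min short (PySem.Int.mod long short) = PySem.Int.mod long short := by omega
        have hmax : max short (PySem.Int.mod long short) = short := by omega
        rw [hmin, hmax,
            ih (PySem.Int.mod long short) short _ (by omega) hm0 (by omega)]
        have hdm := PySem.Int.floordiv_mul_add_mod long short
        have hgcd : Int.gcd (PySem.Int.mod long short) short = Int.gcd short long := by
          rw [PySem.Int.mod_eq_emod_of_pos (show (0:Int) < short by omega),
              Int.gcd_comm _ short, gcd_step long short (by omega) (by omega), Int.gcd_comm]
        rw [hgcd]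
        set c := PySem.Int.floordiv long short
        set r := PySem.Int.mod long short
        have hl : long = c * short + r := by omega
        rw [hl]; ring

-- ===== VERDICT (by name: the statement is the Claim_ definition above) =====
theorem solution_spec : Claim_equal_solution := by
  intro w h_ _ hpre
  obtain ⟨hw, hh⟩ := hpre
  unfold Spec_solution solution solution_alt
  rw [solutionLoop_eq ((min w h_).toNat) _ _ _ le_rfl (le_min hw hh) (min_le_max),
      euclid_eq_gcd w h_ hw hh]
  rcases le_total w h_ with h | h
  · simp [min_eq_left h, max_eq_right h]; ring
  · simp [min_eq_right h, max_eq_left h, Int.gcd_comm]; ring
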